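-- pv_equiv track=rewrite | github.com/djsavvy/CEP-Data-Consolidation-Project | ExistingMongoCrawling/SpeciesEnumeration/outputs_parser.py | delete_useless_empty_dicts
-- ===== SOURCE A (Python) =====
-- def delete_useless_empty_dicts(fields_set):
--     sometimes_empty_dicts = []
--     for x in fields_set:
--         if x.endswith('{}'):
--             sometimes_empty_dicts.append(x[0:-2])
--
--     to_be_discarded = []
--     for x in fields_set:
--         for y in sometimes_empty_dicts:
--             if x.startswith(y) and not x.endswith('{}'):
--                 to_be_discarded.append(y + '{}')
--
--     for x in to_be_discarded:
--         fields_set.discard(x)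
--
--     return fields_set
-- ===== SOURCE B (Python) =====
-- def delete_useless_empty_dicts(fields_set):
--     populated = [x for x in fields_set if not x.endswith('{}')]
--     prefixes = set()
--     for p in populated:
--         for k in range(len(p) + 1):
--             prefixes.add(p[:k])
--     return {s for s in fields_set
--             if not (s.endswith('{}') and s[:-2] in prefixes)}
-- ===== Notes on version B (the rewrite author's own statement) =====
-- stated objective: alternative
-- what changed: A scans every field against every '{}'-variant prefix with nested loops and then discards the hits; B builds one hash set of all prefixes of the populated fields and decides each field with a single membership-filter pass.
import Mathlib
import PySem

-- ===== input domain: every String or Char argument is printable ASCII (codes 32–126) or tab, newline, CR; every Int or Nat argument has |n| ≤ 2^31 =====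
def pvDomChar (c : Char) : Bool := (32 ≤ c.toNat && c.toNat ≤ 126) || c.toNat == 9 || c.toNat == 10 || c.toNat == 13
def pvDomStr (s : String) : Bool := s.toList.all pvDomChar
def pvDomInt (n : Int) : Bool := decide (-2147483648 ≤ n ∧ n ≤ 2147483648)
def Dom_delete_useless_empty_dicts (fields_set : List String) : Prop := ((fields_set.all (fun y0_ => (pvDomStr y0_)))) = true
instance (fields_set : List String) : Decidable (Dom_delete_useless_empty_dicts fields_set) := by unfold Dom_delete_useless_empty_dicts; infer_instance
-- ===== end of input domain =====

-- B replaces A's nested scan (every field against every '{}'-variant prefix) by one hash set of all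
-- prefixes of the populated fields, then a single membership-filter pass; equivalence is about the
-- RETURN value only (Python A mutates its argument set in place, B builds a fresh set).

-- ===== PORT A =====
def delete_useless_empty_dicts (fields_set : List String) : List String :=
  let sometimes_empty_dicts : List String := fields_set.foldl
    (fun acc x => if PySem.Str.endswith x "{}" then acc ++ [PySem.Str.slice x (some 0) (some (-2))] else acc) []
  let to_be_discarded : List String := fields_set.foldl
    (fun acc x => sometimes_empty_dicts.foldl
      (fun acc2 y => if PySem.Str.startswith x y && !PySem.Str.endswith x "{}" then acc2 ++ [y ++ "{}"] else acc2) acc) []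
  to_be_discarded.foldl (fun fs x => PySem.Set.discard fs x) fields_set

-- ===== PORT B =====
def delete_useless_empty_dicts_alt (fields_set : List String) : List String :=
  let populated : List String := fields_set.filter (fun x => !PySem.Str.endswith x "{}")
  let prefixes : PySem.Set String := populated.foldl
    (fun s p => (PySem.List.pyRange 0 (PySem.Str.len p + 1) 1).foldl
      (fun s2 k => PySem.Set.add s2 (PySem.Str.slice p none (some k))) s) PySem.Set.empty
  PySem.Set.ofList (fields_set.filter
    (fun s => !(PySem.Str.endswith s "{}" && PySem.Set.contains prefixes (PySem.Str.slice s none (some (-2))))))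

-- ===== PRECONDITION & SPEC =====
-- Pre_ excludes only lists with duplicate elements: the Python parameter is a set, whose Lean/tester
-- representation is its list of DISTINCT elements, so a duplicated list represents no Python input.
def Pre_delete_useless_empty_dicts (fields_set : List String) : Prop := fields_set.Nodup
instance (fields_set : List String) : Decidable (Pre_delete_useless_empty_dicts fields_set) := by unfold Pre_delete_useless_empty_dicts; infer_instance
def pvWitness_delete_useless_empty_dicts : List String := ["a{}", "ab", "b{}"]

def Spec_delete_useless_empty_dicts (fields_set : List String) (out : List String) : Prop := out = delete_useless_empty_dicts_alt fields_set
instance (fields_set : List String) (out : List String) : Decidable (Spec_delete_useless_empty_dicts fields_set out) := by unfold Spec_delete_useless_empty_dicts; infer_instance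

-- ===== CLAIM (what is proved, stated in full; the proofs are below) =====
def Claim_equal_delete_useless_empty_dicts : Prop := ∀ (fields_set : List String), Dom_delete_useless_empty_dicts fields_set → Pre_delete_useless_empty_dicts fields_set → Spec_delete_useless_empty_dicts fields_set (delete_useless_empty_dicts fields_set)

-- ===== LEMMAS AND PROOFS =====

-- Python's '{}' as a char list
theorem pvCB : "{}".toList = ['{', '}'] := by decide

-- a string ending in '{}' is its [:-2] slice with '{}' appended
theorem pv_ends_decomp (s : String) (h : PySem.Str.endswith s "{}" = true) :
    s = PySem.Str.slice s none (some (-2)) ++ "{}" := by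
  apply String.toList_inj.mp
  simp only [String.toList_append, PySem.Str.toList_slice, PySem.Chars.slice_eq_listSlice, pvCB]
  rw [PySem.List.slice_to_neg_ofNat s.toList 2 (by omega)]
  rw [PySem.Str.endswith_eq, pvCB, PySem.Chars.endswith_iff] at h
  obtain ⟨u, hu⟩ := h
  rw [← hu]
  simp

-- (y ++ '{}') ends with '{}'
theorem pv_ends_append (y : String) : PySem.Str.endswith (y ++ "{}") "{}" = true := by
  rw [PySem.Str.endswith_eq, PySem.Chars.endswith_iff, String.toList_append]
  exact List.suffix_append _ _

-- (y ++ '{}')[:-2] = y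
theorem pv_slice_append (y : String) : PySem.Str.slice (y ++ "{}") none (some (-2)) = y := by
  apply String.toList_inj.mp
  simp only [PySem.Str.toList_slice, PySem.Chars.slice_eq_listSlice, String.toList_append, pvCB]
  rw [PySem.List.slice_to_neg_ofNat _ 2 (by omega)]
  simp

-- x.startswith(y) ↔ y is x[:k] for some 0 ≤ k ≤ len(x) (the k produced by B's range loop)
theorem pv_starts_iff (x y : String) :
    PySem.Str.startswith x y = true ↔
      ∃ k : Int, 0 ≤ k ∧ k < PySem.Str.len x + 1 ∧ y = PySem.Str.slice x none (some k) := by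
  rw [PySem.Str.startswith_eq, PySem.Chars.startswith_iff]
  constructor
  · intro h
    refine ⟨y.toList.length, by exact_mod_cast Nat.zero_le _, ?_, ?_⟩
    · have := h.length_le
      simp only [PySem.Str.len]
      omega
    · apply String.toList_inj.mp
      simp only [PySem.Str.toList_slice, PySem.Chars.slice_eq_listSlice]
      rw [PySem.List.slice_to x.toList (by exact_mod_cast Nat.zero_le _)]
      simpa using List.prefix_iff_eq_take.mp h
  · rintro ⟨k, hk0, _, rfl⟩
    simp only [PySem.Str.toList_slice, PySem.Chars.slice_eq_listSlice]
    rw [PySem.List.slice_to x.toList hk0]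
    exact List.take_prefix _ _

-- membership in a fold of Set.add over a mapped list
theorem pv_mem_foldl_add {β : Type} (l : List β) (f : β → String) (s0 : PySem.Set String) (y : String) :
    y ∈ l.foldl (fun s b => PySem.Set.add s (f b)) s0 ↔ y ∈ s0 ∨ ∃ b ∈ l, y = f b := by
  rw [← PySem.Set.update_map_eq_foldl_add, PySem.Set.mem_update]
  simp [eq_comm]

-- membership in B's prefix set
theorem pv_mem_prefixes (populated : List String) (s0 : PySem.Set String) (y : String) :
    y ∈ populated.foldl
      (fun s p => (PySem.List.pyRange 0 (PySem.Str.len p + 1) 1).foldl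
        (fun s2 k => PySem.Set.add s2 (PySem.Str.slice p none (some k))) s) s0 ↔
      y ∈ s0 ∨ ∃ p ∈ populated, ∃ k : Int, 0 ≤ k ∧ k < PySem.Str.len p + 1 ∧
        y = PySem.Str.slice p none (some k) := by
  induction populated generalizing s0 with
  | nil => simp
  | cons p ps ih =>
    simp only [List.foldl_cons, ih, pv_mem_foldl_add, PySem.List.mem_pyRange_one, List.mem_cons]
    constructor
    · rintro (((h | ⟨k, ⟨hk0, hk1⟩, rfl⟩) | h))
      · exact Or.inl h
      · exact Or.inr ⟨p, Or.inl rfl, k, hk0, hk1, rfl⟩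
      · obtain ⟨q, hq, hk⟩ := h; exact Or.inr ⟨q, Or.inr hq, hk⟩
    · rintro (h | ⟨q, (rfl | hq), k, hk0, hk1, rfl⟩)
      · exact Or.inl (Or.inl h)
      · exact Or.inl (Or.inr ⟨k, ⟨hk0, hk1⟩, rfl⟩)
      · exact Or.inr ⟨q, hq, k, hk0, hk1, rfl⟩

-- A's discard loop is a filter
theorem pv_foldl_discard (tbd fs : List String) :
    tbd.foldl (fun fs x => PySem.Set.discard fs x) fs = fs.filter (fun s => !tbd.contains s) := by
  induction tbd generalizing fs with
  | nil => simp
  | cons x t ih =>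
    rw [List.foldl_cons, ih]
    simp only [PySem.Set.discard, List.filter_filter]
    apply List.filter_congr
    intro a _
    by_cases h : a = x <;> by_cases h2 : a ∈ t <;> simp [h, h2]

-- s[0:-2] is s[:-2]
theorem pv_slice_zero (t : String) :
    PySem.Str.slice t (some 0) (some (-2)) = PySem.Str.slice t none (some (-2)) := by
  apply String.toList_inj.mp
  simp only [PySem.Str.toList_slice, PySem.Chars.slice_eq_listSlice, PySem.List.slice_zero_start]

-- the main pointwise fact: for s in fields_set, A's discard test equals B's removal test
theorem pv_pointwise (fields_set : List String) (s : String) (hs : s ∈ fields_set) :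
    (s ∈ fields_set.foldl
      (fun acc x => ((fields_set.foldl
        (fun acc x => if PySem.Str.endswith x "{}" then acc ++ [PySem.Str.slice x (some 0) (some (-2))] else acc) []).foldl
        (fun acc2 y => if PySem.Str.startswith x y && !PySem.Str.endswith x "{}" then acc2 ++ [y ++ "{}"] else acc2) acc)) []) ↔
    (PySem.Str.endswith s "{}" = true ∧
      PySem.Str.slice s none (some (-2)) ∈
        (fields_set.filter (fun x => !PySem.Str.endswith x "{}")).foldl
          (fun st p => (PySem.List.pyRange 0 (PySem.Str.len p + 1) 1).foldl
            (fun s2 k => PySem.Set.add s2 (PySem.Str.slice p none (some k))) st) PySem.Set.empty) := by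
  rw [show (fields_set.foldl
        (fun acc x => if PySem.Str.endswith x "{}" then acc ++ [PySem.Str.slice x (some 0) (some (-2))] else acc) [])
      = (fields_set.filter (fun x => PySem.Str.endswith x "{}")).map
          (fun x => PySem.Str.slice x (some 0) (some (-2))) from by
    rw [PySem.List.foldl_append_if]; simp]
  simp only [PySem.List.foldl_append_if]
  rw [PySem.List.foldl_append_eq_flatMap]
  rw [pv_mem_prefixes]
  simp only [List.nil_append, List.mem_flatMap, List.mem_map, List.mem_filter,
    Bool.and_eq_true, Bool.not_eq_eq_eq_not, Bool.not_true]
  constructor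
  · rintro ⟨x, hx, y, ⟨⟨t, ⟨ht, hte⟩, rfl⟩, hst, hxe⟩, rfl⟩
    refine ⟨pv_ends_append _, ?_⟩
    rw [pv_slice_append]
    obtain ⟨k, hk0, hk1, hky⟩ := (pv_starts_iff x _).mp hst
    exact Or.inr ⟨x, ⟨hx, hxe⟩, k, hk0, hk1, hky⟩
  · rintro ⟨hse, h | ⟨p, ⟨hp, hpe⟩, k, hk0, hk1, hkey⟩⟩
    · exact absurd h (by simp [PySem.Set.empty])
    · exact ⟨p, hp, PySem.Str.slice s none (some (-2)),
        ⟨⟨s, ⟨hs, hse⟩, pv_slice_zero s⟩, (pv_starts_iff p _).mpr ⟨k, hk0, hk1, hkey⟩, hpe⟩,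
        (pv_ends_decomp s hse).symm⟩

-- ===== VERDICT (by name: the statement is the Claim_ definition above) =====
theorem delete_useless_empty_dicts_spec : Claim_equal_delete_useless_empty_dicts := by
  intro fields_set _ hpre
  unfold Spec_delete_useless_empty_dicts delete_useless_empty_dicts delete_useless_empty_dicts_alt
  simp only []
  rw [pv_foldl_discard]
  rw [PySem.Set.ofList_eq_self_of_nodup _ (hpre.filter _)]
  apply List.filter_congr
  intro s hs
  have h := pv_pointwise fields_set s hs
  congr 1
  rw [show ∀ a b : Bool, a = b ↔ (a = true ↔ b = true) from fun a b => by cases a <;> cases b <;> simp]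
  rw [List.contains_iff_mem, Bool.and_eq_true, PySem.Set.contains_iff]
  exact h
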